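-- pv_equiv track=rewrite | github.com/microsoft/debug-gym | analysis/trajectory_filtering/criteria.py | count_debug_to_code_patterns
-- ===== SOURCE A (Python) =====
-- def count_debug_to_code_patterns(trajectory, max_steps_between=10):
--     """
--     Count how many times a pdb call is followed by a rewrite call within max_steps_between steps.
--     This helps quantify how often debugging leads to code changes.
--
--     Args:
--         trajectory: List of trajectory steps (log entries)
--         max_steps_between: Maximum number of steps allowed between pdb and rewrite calls
--
--     Returns:
--         int: Number of pdb->rewrite patterns found
--     """
--     pattern_count = 0
--
--     for i, step in enumerate(trajectory):
--         action = step.get("action")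
--         if action and action.get("name") == "pdb":
--             # Look ahead for rewrite calls within the specified window
--             for j in range(i + 1, min(i + 1 + max_steps_between, len(trajectory))):
--                 next_step = trajectory[j]
--                 next_action = next_step.get("action")
--                 if next_action and next_action.get("name") == "rewrite":
--                     pattern_count += 1
--                     break  # Only count the first rewrite after each pdb call
--
--     return pattern_count
-- ===== SOURCE B (Python) =====
-- def count_debug_to_code_patterns(trajectory, max_steps_between=10):
--     """Suffix scan precomputing the nearest rewrite index at or after each
--     position, then a single window comparison per pdb step."""
--     n = len(trajectory)
--     # nxt[i] = smallest index j >= i such that trajectory[j] is a rewrite, else None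
--     nxt = [None] * (n + 1)
--     for i in range(n - 1, -1, -1):
--         a = trajectory[i].get("action")
--         if a and a.get("name") == "rewrite":
--             nxt[i] = i
--         else:
--             nxt[i] = nxt[i + 1]
--     count = 0
--     for i, step in enumerate(trajectory):
--         a = step.get("action")
--         if a and a.get("name") == "pdb":
--             j = nxt[i + 1]
--             if j is not None and j <= i + max_steps_between:
--                 count += 1
--     return count
-- ===== Notes on version B (the rewrite author's own statement) =====
-- stated objective: alternative
-- what changed: Replaces A's per-pdb forward scan of the following window by a single backward suffix pass that precomputes the nearest following rewrite index, so each pdb step needs only one window comparison.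
import Mathlib
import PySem

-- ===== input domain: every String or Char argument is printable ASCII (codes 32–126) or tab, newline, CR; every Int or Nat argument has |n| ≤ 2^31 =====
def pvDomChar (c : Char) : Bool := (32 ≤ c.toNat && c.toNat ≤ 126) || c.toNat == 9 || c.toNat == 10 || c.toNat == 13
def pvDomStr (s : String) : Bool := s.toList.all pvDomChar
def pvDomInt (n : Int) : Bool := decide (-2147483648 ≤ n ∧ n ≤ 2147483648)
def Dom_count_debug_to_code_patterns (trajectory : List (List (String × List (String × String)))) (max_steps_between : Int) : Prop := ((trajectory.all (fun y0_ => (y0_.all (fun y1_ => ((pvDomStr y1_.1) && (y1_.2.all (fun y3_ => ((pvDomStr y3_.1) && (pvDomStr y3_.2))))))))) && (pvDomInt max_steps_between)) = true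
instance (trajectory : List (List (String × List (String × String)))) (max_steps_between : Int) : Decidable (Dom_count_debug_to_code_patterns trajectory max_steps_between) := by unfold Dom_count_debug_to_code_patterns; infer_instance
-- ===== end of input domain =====

-- B replaces A's per-pdb forward look-ahead scan by a single backward suffix pass that
-- precomputes the nearest following rewrite index, then one window comparison per pdb step.

-- `step.get("action")` truthiness + `action.get("name") == nm` (shared by both Pythons verbatim)
def pvActionIs (step : List (String × List (String × String))) (nm : String) : Bool :=
  match (PySem.Dict.mk step).get? "action" with
  | none => false
  | some a => !a.isEmpty && ((PySem.Dict.mk a).get? "name" == some nm)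

-- ===== PORT A =====
def count_debug_to_code_patterns (trajectory : List (List (String × List (String × String)))) (max_steps_between : Int) : Int :=
  (PySem.List.enumerate trajectory).foldl
    (fun pattern_count p =>
      if pvActionIs p.2 "pdb" then
        -- inner `for j in range(i+1, min(i+1+max_steps_between, len)) … break` = first-hit search
        if (PySem.List.pyRange (p.1 + 1) (min (p.1 + 1 + max_steps_between) (trajectory.length : Int)) 1).any
             (fun j => match PySem.List.pyGet? trajectory j with
                       | some next_step => pvActionIs next_step "rewrite"
                       | none => false)
        then pattern_count + 1 else pattern_count
      else pattern_count) 0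

-- ===== PORT B =====
-- backward loop of Source B: nxt[i] = nearest index ≥ i with a rewrite action (length n+1, last entry none)
def pvNxtAux (steps : List (List (String × List (String × String)))) (i : Int) : List (Option Int) :=
  match steps with
  | [] => [none]
  | s :: rest =>
      let acc := pvNxtAux rest (i + 1)
      (if pvActionIs s "rewrite" then some i else acc.headD none) :: acc

def count_debug_to_code_patterns_alt (trajectory : List (List (String × List (String × String)))) (max_steps_between : Int) : Int :=
  let nxt := pvNxtAux trajectory 0
  (PySem.List.enumerate trajectory).foldl
    (fun count p =>
      if pvActionIs p.2 "pdb" then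
        match nxt.getD (p.1 + 1).toNat none with
        | some j => if j ≤ p.1 + max_steps_between then count + 1 else count
        | none => count
      else count) 0

-- ===== PRECONDITION & SPEC =====
def Spec_count_debug_to_code_patterns (trajectory : List (List (String × List (String × String)))) (max_steps_between : Int) (out : Int) : Prop := out = count_debug_to_code_patterns_alt trajectory max_steps_between
instance (trajectory : List (List (String × List (String × String)))) (max_steps_between : Int) (out : Int) : Decidable (Spec_count_debug_to_code_patterns trajectory max_steps_between out) := by unfold Spec_count_debug_to_code_patterns; infer_instance

-- ===== CLAIM (what is proved, stated in full; the proofs are below) =====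
def Claim_equal_count_debug_to_code_patterns : Prop := ∀ (trajectory : List (List (String × List (String × String)))) (max_steps_between : Int), Dom_count_debug_to_code_patterns trajectory max_steps_between → Spec_count_debug_to_code_patterns trajectory max_steps_between (count_debug_to_code_patterns trajectory max_steps_between)

-- ===== LEMMAS AND PROOFS =====

-- characterisation of the suffix table: entry k is the first rewrite position in the suffix from k
theorem pvNxtAux_getD (steps : List (List (String × List (String × String)))) (i : Int) (k : Nat)
    (hk : k ≤ steps.length) :
    (pvNxtAux steps i).getD k none =
      ((steps.drop k).findIdx? (fun s => pvActionIs s "rewrite")).map (fun d => i + (k : Int) + (d : Int)) := by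
  induction steps generalizing i k with
  | nil =>
      have hk0 : k = 0 := by simpa using hk
      subst hk0
      simp [pvNxtAux]
  | cons s rest ih =>
      cases k with
      | zero =>
          simp only [pvNxtAux, List.drop_zero, List.findIdx?_cons, List.getD_cons_zero]
          by_cases h : pvActionIs s "rewrite"
          · simp [h]
          · have h0 : (pvNxtAux rest (i + 1)).headD none = (pvNxtAux rest (i + 1)).getD 0 none := by
              cases hrec : pvNxtAux rest (i + 1) <;> simp
            rw [h0, ih (i + 1) 0 (by omega)]
            simp [h]
            cases rest.findIdx? (fun s => pvActionIs s "rewrite")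
            · simp
            · simp; push_cast; ring
      | succ k' =>
          simp only [pvNxtAux, List.getD_cons_succ, List.drop_succ_cons]
          rw [ih (i + 1) k' (by simpa using hk)]
          cases (rest.drop k').findIdx? (fun s => pvActionIs s "rewrite")
          · simp
          · simp; push_cast; ring

-- per-index equality of the two counting conditions
theorem cond_eq (t : List (List (String × List (String × String)))) (m : Int) (k : Nat) (hk : k < t.length) :
    ((PySem.List.pyRange ((k : Int) + 1) (min ((k : Int) + 1 + m) (t.length : Int)) 1).any
       (fun j => match PySem.List.pyGet? t j with
                 | some next_step => pvActionIs next_step "rewrite"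
                 | none => false))
    = (match (pvNxtAux t 0).getD ((k : Int) + 1).toNat none with
       | some j => decide (j ≤ (k : Int) + m)
       | none => false) := by
  have htoNat : ((k : Int) + 1).toNat = k + 1 := by omega
  rw [htoNat, pvNxtAux_getD t 0 (k + 1) (by omega)]
  rcases hfi : (t.drop (k + 1)).findIdx? (fun s => pvActionIs s "rewrite") with _ | d
  · -- no rewrite in the suffix: the range scan finds nothing
    rw [List.findIdx?_eq_none_iff] at hfi
    simp only [Option.bind_eq_bind, Option.bind_none, Option.map_none]
    rw [List.any_eq_false]
    intro j hj
    rw [PySem.List.mem_pyRange_one] at hj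
    have h0 : 0 ≤ j := by omega
    have hlt : j.toNat < t.length := by omega
    rw [PySem.List.pyGet?_of_nonneg t h0, List.getElem?_eq_getElem hlt]
    have hmem : t[j.toNat] ∈ t.drop (k + 1) := by
      rw [List.mem_iff_getElem]
      refine ⟨j.toNat - (k + 1), by simp; omega, ?_⟩
      rw [List.getElem_drop]
      congr 1
      omega
    simpa using hfi _ hmem
  · -- first rewrite in the suffix is at absolute index k+1+d
    rw [List.findIdx?_eq_some_iff_getElem] at hfi
    obtain ⟨hd, hpd, hmin⟩ := hfi
    simp only [Option.bind_eq_bind, Option.bind_some, Option.pure_def, Option.map_some]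
    have hlen : (t.drop (k + 1)).length = t.length - (k + 1) := by simp
    have habs : k + 1 + d < t.length := by omega
    have hidx : (t.drop (k + 1))[d] = t[k + 1 + d]'habs := by
      rw [List.getElem_drop]
    by_cases hwin : (0 : Int) + ((k : Nat) + 1 : Nat) + (d : Int) ≤ (k : Int) + m
    · -- inside the window: j = k+1+d is in the range and is a rewrite
      have : ((PySem.List.pyRange ((k : Int) + 1) (min ((k : Int) + 1 + m) (t.length : Int)) 1).any
       (fun j => match PySem.List.pyGet? t j with
                 | some next_step => pvActionIs next_step "rewrite"
                 | none => false)) = true := by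
        rw [List.any_eq_true]
        refine ⟨((k : Int) + 1 + (d : Int)), ?_, ?_⟩
        · rw [PySem.List.mem_pyRange_one]
          push_cast at hwin ⊢
          constructor
          · omega
          · have : ((k : Nat) + 1 + d : Nat) < t.length := habs
            push_cast at this ⊢
            omega
        · have h0 : (0:Int) ≤ (k : Int) + 1 + (d : Int) := by positivity
          rw [PySem.List.pyGet?_of_nonneg t h0]
          have ht' : ((k : Int) + 1 + (d : Int)).toNat = k + 1 + d := by omega
          rw [ht', List.getElem?_eq_getElem habs]
          simpa [hidx] using hpd
      rw [this]
      push_cast at hwin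
      symm
      rw [decide_eq_true_iff]
      push_cast
      omega
    · -- outside the window: no rewrite can occur in the (clipped) range, by minimality of d
      have : ((PySem.List.pyRange ((k : Int) + 1) (min ((k : Int) + 1 + m) (t.length : Int)) 1).any
       (fun j => match PySem.List.pyGet? t j with
                 | some next_step => pvActionIs next_step "rewrite"
                 | none => false)) = false := by
        rw [List.any_eq_false]
        intro j hj
        rw [PySem.List.mem_pyRange_one] at hj
        have h0 : 0 ≤ j := by omega
        have hlt : j.toNat < t.length := by omega
        rw [PySem.List.pyGet?_of_nonneg t h0, List.getElem?_eq_getElem hlt]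
        -- j < k+1+d since j ≤ k+m < k+1+d
        have hjd : j.toNat - (k + 1) < d := by push_cast at hwin; omega
        have := hmin (j.toNat - (k + 1)) hjd
        rw [List.getElem_drop] at this
        have harg : k + 1 + (j.toNat - (k + 1)) = j.toNat := by omega
        simp only [harg] at this
        simpa using this
      rw [this]
      push_cast at hwin
      symm
      rw [decide_eq_false_iff_not]
      push_cast
      omega

-- ===== VERDICT (by name: the statement is the Claim_ definition above) =====
theorem count_debug_to_code_patterns_spec : Claim_equal_count_debug_to_code_patterns := by
  intro t m _
  unfold Spec_count_debug_to_code_patterns count_debug_to_code_patterns count_debug_to_code_patterns_alt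
  apply PySem.List.foldl_congr_mem
  intro acc p hp
  rw [PySem.List.mem_enumerate_iff] at hp
  obtain ⟨k, hk, rfl⟩ := hp
  simp only [zero_add]
  by_cases hpdb : pvActionIs t[k] "pdb"
  · simp only [hpdb, if_true]
    rw [cond_eq t m k hk]
    cases h : (pvNxtAux t 0).getD ((k : Int) + 1).toNat none with
    | none => simp
    | some j => by_cases hw : j ≤ (k : Int) + m <;> simp [hw]
  · simp [hpdb]
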